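-- pv_equiv track=rewrite | github.com/president-xd/Writeups | FlagYard/Training_Labs/Crypto/normal-el-gamal/solution.py | recover_a_b
-- ===== SOURCE A (Python) =====
-- def modinv(a, p):
--     return pow(a % p, p-2, p)
--
-- def recover_a_b(points, p):
--     # Use two points to solve for a, then compute b.
--     # t_i = y^2 - x^3 (mod p), so t_i = a x_i + b (mod p)
--     for i in range(len(points)):
--         for j in range(i+1, len(points)):
--             xi, yi = points[i]
--             xj, yj = points[j]
--             if (xi - xj) % p == 0:
--                 continue
--             ti = (yi*yi - xi*xi*xi) % p
--             tj = (yj*yj - xj*xj*xj) % p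
--             a = ((ti - tj) * modinv(xi - xj, p)) % p
--             b = (ti - a*xi) % p
--             return a, b
--     raise RuntimeError("could not recover a,b (degenerate points)")
-- ===== SOURCE B (Python) =====
-- def modinv(a, p):
--     return pow(a % p, p-2, p)
--
-- def recover_a_b(points, p):
--     # Single pass: A's nested loop can only ever return a pair built from points[0],
--     # so scan points[1:] for the first point with x not congruent to x0 mod p.
--     if not points:
--         raise RuntimeError("could not recover a,b (degenerate points)")
--     x0, y0 = points[0]
--     t0 = (y0*y0 - x0*x0*x0) % p
--     for xj, yj in points[1:]:
--         if (x0 - xj) % p == 0: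
--             continue
--         tj = (yj*yj - xj*xj*xj) % p
--         a = ((t0 - tj) * modinv(x0 - xj, p)) % p
--         b = (t0 - a*x0) % p
--         return a, b
--     raise RuntimeError("could not recover a,b (degenerate points)")
-- ===== Notes on version B (the rewrite author's own statement) =====
-- stated objective: simpler
-- what changed: Replaces A's nested index loop over all pairs (i,j) by a single pass over points[1:] against points[0] (A can only ever return a pair built from points[0], since if every point shares points[0]'s x mod p all pairs are congruent), with t0 computed once before the loop.
import Mathlib
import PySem

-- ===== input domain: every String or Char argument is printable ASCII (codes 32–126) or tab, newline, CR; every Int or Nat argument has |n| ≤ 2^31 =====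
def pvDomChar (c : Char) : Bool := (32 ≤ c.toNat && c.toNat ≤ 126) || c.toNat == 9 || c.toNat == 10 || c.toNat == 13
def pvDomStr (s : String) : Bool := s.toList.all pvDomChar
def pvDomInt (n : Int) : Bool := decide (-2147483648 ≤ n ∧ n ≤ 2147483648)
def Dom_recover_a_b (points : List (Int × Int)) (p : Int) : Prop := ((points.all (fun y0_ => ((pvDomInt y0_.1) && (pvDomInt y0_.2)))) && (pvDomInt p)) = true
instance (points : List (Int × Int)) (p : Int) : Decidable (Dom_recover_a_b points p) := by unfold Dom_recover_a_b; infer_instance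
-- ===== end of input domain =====

-- B replaces A's nested loop over all index pairs by a single pass over points[1:] against points[0] (simpler; same values).

-- ===== PORT A =====
-- shared-module helper modinv(a, p) = pow(a % p, p-2, p); both Pythons contain this identical helper.
-- Built-in three-argument pow is ported by hand as binary modular exponentiation (pmNat below): PySem.Int.powMod
-- denotes the same value but computes b^e in full, which does not evaluate in reasonable time for |p| ~ 2^31.
-- pmNat b e n (n = |p| > 0) returns b^e reduced mod n in [0, n); the final PySem.Int.mod maps it into the
-- representative range Python uses for modulus p (exact also for p < 0, since the result only depends on b^e mod |p|).
-- Python's pow with a NEGATIVE exponent (here: p < 2) first inverts (a % p) modulo p — ValueError if not coprime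
-- (Pre_ excludes that) — then powers; any representative of the inverse class gives the same result under the
-- final mod, so Int.gcdA (a Bezout coefficient, an inverse mod |p| when the gcd is 1) is exact there.
def pmNat (b : Int) (e : Nat) (n : Int) : Int :=
  if h : e = 0 then 1 % n
  else
    let r := pmNat (b * b % n) (e / 2) n
    if e % 2 = 1 then r * b % n else r
termination_by e
decreasing_by exact Nat.div_lt_self (Nat.pos_of_ne_zero h) (by norm_num)

def modinv (a p : Int) : Int :=
  if 0 ≤ p - 2 then PySem.Int.mod (pmNat (PySem.Int.mod a p) (p - 2).toNat (p.natAbs : Int)) p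
  else if Int.gcd (PySem.Int.mod a p) p = 1 then
    PySem.Int.mod (pmNat (Int.gcdA (PySem.Int.mod a p) p) (2 - p).toNat (p.natAbs : Int)) p
  else 0  -- Python raises ValueError here; Pre_ excludes these inputs

def recoverLoopJ (points : List (Int × Int)) (p : Int) (i : Int) : List Int → Option (Int × Int)
  | [] => none
  | j :: rest =>
    match PySem.List.pyGet? points i, PySem.List.pyGet? points j with
    | some (xi, yi), some (xj, yj) =>
      if PySem.Int.mod (xi - xj) p = 0 then recoverLoopJ points p i rest
      else
        let ti := PySem.Int.mod (yi*yi - xi*xi*xi) p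
        let tj := PySem.Int.mod (yj*yj - xj*xj*xj) p
        let a := PySem.Int.mod ((ti - tj) * modinv (xi - xj) p) p
        let b := PySem.Int.mod (ti - a*xi) p
        some (a, b)
    | _, _ => none  -- unreachable: i and j come from range(len(points))

def recoverLoopI (points : List (Int × Int)) (p : Int) : List Int → Option (Int × Int)
  | [] => none
  | i :: rest =>
    match recoverLoopJ points p i (PySem.List.pyRange (i+1) points.length 1) with
    | some r => some r
    | none => recoverLoopI points p rest

def recover_a_b (points : List (Int × Int)) (p : Int) : Int × Int :=
  match recoverLoopI points p (PySem.List.pyRange 0 points.length 1) with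
  | some r => r
  | none => (0, 0)  -- Python raises RuntimeError here; Pre_ excludes these inputs

-- ===== PORT B =====
def recoverScan (x0 t0 p : Int) : List (Int × Int) → Option (Int × Int)
  | [] => none
  | (xj, yj) :: rest =>
    if PySem.Int.mod (x0 - xj) p = 0 then recoverScan x0 t0 p rest
    else
      let tj := PySem.Int.mod (yj*yj - xj*xj*xj) p
      let a := PySem.Int.mod ((t0 - tj) * modinv (x0 - xj) p) p
      let b := PySem.Int.mod (t0 - a*x0) p
      some (a, b)

def recover_a_b_alt (points : List (Int × Int)) (p : Int) : Int × Int :=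
  match points with
  | [] => (0, 0)  -- Python raises RuntimeError here; Pre_ excludes these inputs
  | (x0, y0) :: rest =>
    let t0 := PySem.Int.mod (y0*y0 - x0*x0*x0) p
    match recoverScan x0 t0 p rest with
    | some r => r
    | none => (0, 0)  -- Python raises RuntimeError here; Pre_ excludes these inputs

-- ===== PRECONDITION & SPEC =====
-- Exactly the inputs on which Python A returns: p ≠ 0 (else ZeroDivisionError / RuntimeError), some point after
-- points[0] has x not congruent to points[0]'s x mod p (else RuntimeError), and at the FIRST such point, if p < 0
-- (negative exponent p-2 in pow) the difference of x's must be invertible mod p (else ValueError).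
def Pre_recover_a_b (points : List (Int × Int)) (p : Int) : Prop :=
  p ≠ 0 ∧
  ∃ k : Nat, k < points.tail.length ∧
    PySem.Int.mod ((points.headD (0,0)).1 - (points.tail.getD k (0,0)).1) p ≠ 0 ∧
    (p < 0 → Int.gcd ((points.headD (0,0)).1 - (points.tail.getD k (0,0)).1) p = 1) ∧
    ∀ i : Nat, i < k → PySem.Int.mod ((points.headD (0,0)).1 - (points.tail.getD i (0,0)).1) p = 0
instance (points : List (Int × Int)) (p : Int) : Decidable (Pre_recover_a_b points p) := by unfold Pre_recover_a_b; infer_instance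

def pvWitness_recover_a_b : (List (Int × Int)) × Int := ([(1, 2), (3, 4)], 5)

def Spec_recover_a_b (points : List (Int × Int)) (p : Int) (out : Int × Int) : Prop := out = recover_a_b_alt points p
instance (points : List (Int × Int)) (p : Int) (out : Int × Int) : Decidable (Spec_recover_a_b points p out) := by unfold Spec_recover_a_b; infer_instance

-- ===== CLAIM (what is proved, stated in full; the proofs are below) =====
def Claim_equal_recover_a_b : Prop := ∀ (points : List (Int × Int)) (p : Int), Dom_recover_a_b points p → Pre_recover_a_b points p → Spec_recover_a_b points p (recover_a_b points p)

-- ===== LEMMAS AND PROOFS =====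

-- If some element of the list has x not congruent to x0 mod p, the scan returns a value.
lemma recoverScan_isSome (x0 t0 p : Int) (rest : List (Int × Int)) (q : Int × Int)
    (hq : q ∈ rest) (h : PySem.Int.mod (x0 - q.1) p ≠ 0) :
    (recoverScan x0 t0 p rest).isSome := by
  induction rest with
  | nil => cases hq
  | cons hd tl ih =>
    obtain ⟨xj, yj⟩ := hd
    by_cases hc : PySem.Int.mod (x0 - xj) p = 0
    · rcases List.mem_cons.mp hq with hq0 | hq1
      · exact absurd hc (by simpa [hq0] using h)
      · simpa [recoverScan, hc] using ih hq1
    · simp [recoverScan, hc]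

-- A's inner loop at i = 0, over range(m, len(points)) with 1 ≤ m, is B's scan over points.drop m.
lemma loopJ_eq_scan (x0 y0 p : Int) (rest : List (Int × Int)) :
    ∀ m : Nat, 1 ≤ m →
      recoverLoopJ ((x0, y0) :: rest) p 0 (PySem.List.pyRange (m : Int) (((x0, y0) :: rest).length : Int) 1)
        = recoverScan x0 (PySem.Int.mod (y0*y0 - x0*x0*x0) p) p (((x0, y0) :: rest).drop m) := by
  intro m hm
  generalize hd : ((x0, y0) :: rest).length - m = d
  induction d generalizing m with
  | zero =>
    have hle : ((x0, y0) :: rest).length ≤ m := by omega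
    rw [PySem.List.pyRange_one_eq_nil (by exact_mod_cast hle), List.drop_eq_nil_of_le hle]
    rfl
  | succ d ih =>
    have hlt : m < ((x0, y0) :: rest).length := by omega
    rw [PySem.List.pyRange_one_cons (by exact_mod_cast hlt), List.drop_eq_getElem_cons hlt]
    rcases hq : ((x0, y0) :: rest)[m] with ⟨xj, yj⟩
    simp only [recoverLoopJ, recoverScan, PySem.List.pyGet?_zero_cons, PySem.List.pyGet?_natCast,
      List.getElem?_eq_getElem hlt, hq]
    by_cases hc : PySem.Int.mod (x0 - xj) p = 0
    · simp only [hc, if_true]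
      have hcast : ((m : Int) + 1) = ((m + 1 : Nat) : Int) := by push_cast; ring
      rw [hcast]
      exact ih (m + 1) (by omega) (by omega)
    · simp only [hc, if_false]

-- ===== VERDICT =====
theorem recover_a_b_spec : Claim_equal_recover_a_b := by
  intro points p _hdom hpre
  obtain ⟨hp0, k, hk, hmod, _, _⟩ := hpre
  unfold Spec_recover_a_b
  match points with
  | [] => simp at hk
  | (x0, y0) :: rest =>
    have hq : rest.getD k (0,0) ∈ rest := by
      have hk' : k < rest.length := by simpa using hk
      rw [List.getD_eq_getElem rest (0,0) hk']
      exact List.getElem_mem hk'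
    have hmod' : PySem.Int.mod (x0 - (rest.getD k (0,0)).1) p ≠ 0 := by simpa using hmod
    have hscan := recoverScan_isSome x0 (PySem.Int.mod (y0*y0 - x0*x0*x0) p) p rest _ hq hmod'
    obtain ⟨r, hr⟩ := Option.isSome_iff_exists.mp hscan
    have hlen : (0 : Int) < (((x0, y0) :: rest).length : Int) := by simp
    have houter : PySem.List.pyRange 0 (((x0, y0) :: rest).length : Int) 1
        = 0 :: PySem.List.pyRange 1 (((x0, y0) :: rest).length : Int) 1 := by
      simpa using PySem.List.pyRange_one_cons hlen
    have hinner := loopJ_eq_scan x0 y0 p rest 1 le_rfl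
    simp only [List.drop_one, List.tail_cons] at hinner
    unfold recover_a_b
    rw [houter]
    unfold recoverLoopI
    rw [show ((0 : Int) + 1) = ((1 : Nat) : Int) by norm_num, hinner, hr]
    simp [recover_a_b_alt, hr]
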